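-- pv_equiv track=rewrite | github.com/oncoguide/oncoguide.github.io | agents/research/modules/validation.py | _extract_issue_sections
-- ===== SOURCE A (Python) =====
-- def _extract_issue_sections(guide_text: str, accuracy_issues: list) -> str:
--     """Extract only the guide sections referenced by accuracy issues (reduces Sonnet input tokens)."""
--     if not accuracy_issues:
--         return guide_text
--
--     mentioned_sections = {issue.get("section", "") for issue in accuracy_issues if issue.get("section")}
--     if not mentioned_sections:
--         return guide_text
--
--     lines = guide_text.split("\n")
--     selected = []
--     in_section = False
--     current_section_name = ""
--
--     for line in lines:
--         if line.startswith("## "):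
--             current_section_name = line.lower()
--             in_section = any(sec.lower() in current_section_name for sec in mentioned_sections)
--         if in_section or line.startswith("# "):
--             selected.append(line)
--
--     return "\n".join(selected) if selected else guide_text
-- ===== SOURCE B (Python) =====
-- def _extract_issue_sections(guide_text: str, accuracy_issues: list) -> str:
--     """Block-based rewrite: partition lines into '## ' sections and select per block."""
--     if not accuracy_issues:
--         return guide_text
--
--     mentioned = [issue.get("section", "").lower()
--                  for issue in accuracy_issues if issue.get("section")]
--     if not mentioned:
--         return guide_text
--
--     lines = guide_text.split("\n")
--     n = len(lines)
--     out = []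
--     i = 0
--     while i < n:
--         line = lines[i]
--         if line.startswith("## "):
--             j = i + 1
--             while j < n and not lines[j].startswith("## "):
--                 j += 1
--             block = lines[i:j]
--             if any(sec in line.lower() for sec in mentioned):
--                 out.extend(block)
--             else:
--                 out.extend(l for l in block if l.startswith("# "))
--             i = j
--         else:
--             if line.startswith("# "):
--                 out.append(line)
--             i += 1
--     return "\n".join(out) if out else guide_text
-- ===== Notes on version B (the rewrite author's own statement) =====
-- stated objective: alternative
-- what changed: Replaces A's single line-by-line scan carrying an in_section flag (and a set built by comprehension) with a block decomposition: the lines are partitioned into the preamble and one block per '## ' header, and each block is emitted whole (header matched against a precomputed lowered mention list) or reduced to its '# ' lines.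
import Mathlib
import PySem

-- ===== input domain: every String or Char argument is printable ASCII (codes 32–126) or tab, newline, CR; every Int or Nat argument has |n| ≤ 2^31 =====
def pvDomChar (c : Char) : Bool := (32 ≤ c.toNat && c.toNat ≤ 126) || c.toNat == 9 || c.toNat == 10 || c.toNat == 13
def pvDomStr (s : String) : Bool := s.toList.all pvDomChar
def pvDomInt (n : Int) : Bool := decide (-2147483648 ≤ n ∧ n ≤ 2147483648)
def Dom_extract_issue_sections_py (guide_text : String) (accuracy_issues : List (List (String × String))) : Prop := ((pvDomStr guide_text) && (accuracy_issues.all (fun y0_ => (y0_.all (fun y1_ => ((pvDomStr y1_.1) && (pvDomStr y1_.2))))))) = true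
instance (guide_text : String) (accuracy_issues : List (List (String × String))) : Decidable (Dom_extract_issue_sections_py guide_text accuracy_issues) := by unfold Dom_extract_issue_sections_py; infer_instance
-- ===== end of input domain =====

-- B re-implements A with a block decomposition: one pass that partitions the lines into '## ' sections
-- and selects whole blocks (or their '# ' lines) at once; objective: alternative structure, same cost.


-- ===== PORT A =====
-- literal transliteration of A: a set comprehension, then one fold over the lines with
-- state (selected, in_section, current_section_name)
def extract_issue_sections_py (guide_text : String) (accuracy_issues : List (List (String × String))) : String :=
  if accuracy_issues.isEmpty then guide_text else
  let mentioned_sections : PySem.Set String :=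
    accuracy_issues.foldl (fun s issue =>
      if (PySem.Dict.getD (PySem.Dict.mk issue) "section" "") != "" then
        PySem.Set.add s (PySem.Dict.getD (PySem.Dict.mk issue) "section" "")
      else s) []
  if mentioned_sections.isEmpty then guide_text else
  let lines := (PySem.Str.split? guide_text "\n").getD []   -- sep "\n" ≠ "": split? is some here
  let res := lines.foldl (fun (st : List String × Bool × String) line =>
      let selected := st.1
      let in_section := st.2.1
      let current_section_name := st.2.2
      let (in_section, current_section_name) :=
        if PySem.Str.startswith line "## " then
          let current_section_name := PySem.Str.lower line
          (mentioned_sections.any (fun sec =>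
              PySem.Str.isIn (PySem.Str.lower sec) current_section_name),
           current_section_name)
        else (in_section, current_section_name)
      let selected :=
        if in_section || PySem.Str.startswith line "# " then selected ++ [line] else selected
      (selected, in_section, current_section_name)) ([], false, "")
  if res.1.isEmpty then guide_text else PySem.Str.join "\n" res.1

-- ===== PORT B =====
-- helpers for B: block-at-a-time selection (the two while loops of Source B as structural recursion)
def pvIsHeader (l : String) : Bool := PySem.Str.startswith l "## "

def pvSelectB (mentioned : List String) : List String → List String
  | [] => []
  | line :: rest =>
    if pvIsHeader line then
      -- inner while: scan forward to the next '## ' header; block = lines[i:j]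
      let body := rest.takeWhile (fun l => !pvIsHeader l)
      let rest' := rest.dropWhile (fun l => !pvIsHeader l)
      (if mentioned.any (fun sec => PySem.Str.isIn sec (PySem.Str.lower line)) then
        line :: body
      else (line :: body).filter (fun l => PySem.Str.startswith l "# ")) ++
        pvSelectB mentioned rest'
    else
      (if PySem.Str.startswith line "# " then [line] else []) ++ pvSelectB mentioned rest
termination_by lines => lines.length
decreasing_by
  · simp only [List.length_cons]
    have := List.length_dropWhile_le (fun l => !pvIsHeader l) rest
    omega
  · simp

def extract_issue_sections_py_alt (guide_text : String) (accuracy_issues : List (List (String × String))) : String :=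
  if accuracy_issues.isEmpty then guide_text else
  let mentioned : List String :=
    (accuracy_issues.filter (fun issue =>
        (PySem.Dict.getD (PySem.Dict.mk issue) "section" "") != "")).map
      (fun issue => PySem.Str.lower (PySem.Dict.getD (PySem.Dict.mk issue) "section" ""))
  if mentioned.isEmpty then guide_text else
  let lines := (PySem.Str.split? guide_text "\n").getD []
  let out := pvSelectB mentioned lines
  if out.isEmpty then guide_text else PySem.Str.join "\n" out

-- ===== PRECONDITION & SPEC =====
def Spec_extract_issue_sections_py (guide_text : String) (accuracy_issues : List (List (String × String))) (out : String) : Prop := out = extract_issue_sections_py_alt guide_text accuracy_issues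
instance (guide_text : String) (accuracy_issues : List (List (String × String))) (out : String) : Decidable (Spec_extract_issue_sections_py guide_text accuracy_issues out) := by unfold Spec_extract_issue_sections_py; infer_instance

-- ===== CLAIM (what is proved, stated in full; the proofs are below) =====
def Claim_equal_extract_issue_sections_py : Prop := ∀ (guide_text : String) (accuracy_issues : List (List (String × String))), Dom_extract_issue_sections_py guide_text accuracy_issues → Spec_extract_issue_sections_py guide_text accuracy_issues (extract_issue_sections_py guide_text accuracy_issues)

-- ===== LEMMAS AND PROOFS =====

-- H: A's line loop with the accumulator stripped, parametrised by B's (lowered) mentioned list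
def pvH (M : List String) : List String → Bool → List String
  | [], _ => []
  | line :: rest, ins =>
    let ins' := if pvIsHeader line then M.any (fun sec => PySem.Str.isIn sec (PySem.Str.lower line)) else ins
    (if ins' || PySem.Str.startswith line "# " then [line] else []) ++ pvH M rest ins'

theorem pv_header_not_hash (l : String) (h : pvIsHeader l = true) :
    PySem.Str.startswith l "# " = false := by
  rw [pvIsHeader] at h
  rw [Bool.eq_false_iff]
  intro h2
  rw [PySem.Str.startswith] at h h2
  rw [PySem.Chars.startswith_iff] at h h2
  rcases List.prefix_or_prefix_of_prefix h h2 with hp | hp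
  · have := hp.length_le; simp at this
  · rcases h2 with ⟨t, ht⟩
    rcases h with ⟨t', ht'⟩
    rw [← ht'] at ht
    simp at ht

theorem pvH_run (M : List String) (body rest' : List String)
    (hb : ∀ l ∈ body, pvIsHeader l = false) (ins : Bool) :
    pvH M (body ++ rest') ins =
      (if ins then body else body.filter (fun l => PySem.Str.startswith l "# ")) ++ pvH M rest' ins := by
  induction body with
  | nil => simp
  | cons l b ih =>
    have hl : pvIsHeader l = false := hb l (by simp)
    simp only [List.cons_append, pvH, hl, Bool.false_eq_true, if_false]
    rw [ih (fun x hx => hb x (by simp [hx]))]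
    cases ins with
    | true => simp
    | false => simp [List.filter_cons]; split <;> simp

theorem pvH_header_flag (M : List String) (l : String) (r : List String)
    (h : pvIsHeader l = true) (ins ins₂ : Bool) :
    pvH M (l :: r) ins = pvH M (l :: r) ins₂ := by
  simp only [pvH, h, if_pos]

theorem pv_dropWhile_head (p : String → Bool) (rest : List String) (l : String) (r : List String)
    (h : rest.dropWhile p = l :: r) : p l = false := by
  have := List.head?_dropWhile_not p rest
  rw [h] at this
  simpa using this

theorem pvH_eq_selectB (M : List String) (lines : List String) :
    pvH M lines false = pvSelectB M lines := by
  have main : ∀ n (ls : List String), ls.length ≤ n → pvH M ls false = pvSelectB M ls := by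
    intro n
    induction n with
    | zero => intro ls hls; rw [List.length_eq_zero_iff.mp (Nat.le_zero.mp hls)]; simp [pvH, pvSelectB]
    | succ n ih =>
      intro ls hls
      match ls with
      | [] => simp [pvH, pvSelectB]
      | line :: rest =>
        by_cases hh : pvIsHeader line = true
        · rw [pvSelectB]
          simp only [hh, if_pos]
          have hhash := pv_header_not_hash line hh
          set b := M.any (fun sec => PySem.Str.isIn sec (PySem.Str.lower line)) with hb
          have hdecomp : rest = rest.takeWhile (fun l => !pvIsHeader l) ++ rest.dropWhile (fun l => !pvIsHeader l) :=
            (List.takeWhile_append_dropWhile).symm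
          have hbody : ∀ l ∈ rest.takeWhile (fun l => !pvIsHeader l), pvIsHeader l = false := by
            intro l hl
            have := List.mem_takeWhile_imp hl
            simpa using this
          have hrestflag : pvH M (rest.dropWhile (fun l => !pvIsHeader l)) b
              = pvH M (rest.dropWhile (fun l => !pvIsHeader l)) false := by
            cases hdw : rest.dropWhile (fun l => !pvIsHeader l) with
            | nil => rfl
            | cons l' r' =>
              have : pvIsHeader l' = true := by
                have := pv_dropWhile_head _ rest l' r' hdw
                simpa using this
              exact pvH_header_flag M l' r' this b false
          have hlen : (rest.dropWhile (fun l => !pvIsHeader l)).length ≤ n := by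
            have := List.length_dropWhile_le (fun l => !pvIsHeader l) rest
            simp only [List.length_cons] at hls
            omega
          calc pvH M (line :: rest) false
              = (if b || PySem.Str.startswith line "# " then [line] else []) ++ pvH M rest b := by
                rw [hb]
                simp only [pvH, hh, if_pos]
            _ = (if b then [line] else []) ++ pvH M rest b := by rw [hhash, Bool.or_false]
            _ = (if b then [line] else []) ++
                ((if b then rest.takeWhile (fun l => !pvIsHeader l)
                  else (rest.takeWhile (fun l => !pvIsHeader l)).filter (fun l => PySem.Str.startswith l "# ")) ++
                 pvH M (rest.dropWhile (fun l => !pvIsHeader l)) b) := by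
                conv_lhs => rw [hdecomp]
                rw [pvH_run M _ _ hbody b]
            _ = (if b then line :: rest.takeWhile (fun l => !pvIsHeader l)
                  else ((line :: rest.takeWhile (fun l => !pvIsHeader l)).filter (fun l => PySem.Str.startswith l "# "))) ++
                 pvSelectB M (rest.dropWhile (fun l => !pvIsHeader l)) := by
                rw [hrestflag, ih _ hlen]
                have hhash2 : PySem.Chars.startswith line.toList ['#', ' '] = false := by
                  simpa using hhash
                cases b <;> simp [hhash2]
        · rw [Bool.not_eq_true] at hh
          rw [pvSelectB]
          simp only [hh, Bool.false_eq_true, if_false]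
          simp only [pvH, hh, Bool.false_eq_true, if_false, Bool.false_or]
          rw [ih rest (by simp only [List.length_cons] at hls; omega)]
  exact main lines.length lines le_rfl

theorem pv_foldA_eq_H (M : List String)
    (step : List String × Bool × String → String → List String × Bool × String)
    (hstep : ∀ st line, step st line =
      (let ins' := if pvIsHeader line then M.any (fun sec => PySem.Str.isIn sec (PySem.Str.lower line)) else st.2.1
       let cur' := if pvIsHeader line then PySem.Str.lower line else st.2.2
       ((if ins' || PySem.Str.startswith line "# " then st.1 ++ [line] else st.1), ins', cur')))
    (lines : List String) :
    ∀ acc ins cur, (lines.foldl step (acc, ins, cur)).1 = acc ++ pvH M lines ins := by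
  induction lines with
  | nil => intro acc ins cur; simp [pvH]
  | cons line rest ih =>
    intro acc ins cur
    rw [List.foldl_cons, hstep]
    simp only [pvH]
    set ins' := if pvIsHeader line then M.any (fun sec => PySem.Str.isIn sec (PySem.Str.lower line)) else ins with hins
    by_cases hc : (ins' || PySem.Str.startswith line "# ") = true
    · simp only [hc, if_pos, ih]
      simp
    · rw [Bool.not_eq_true] at hc
      simp only [hc, ih]
      simp

-- A's set comprehension is ofList of the filtered/mapped issue list
theorem pv_setA_eq (ai : List (List (String × String))) :
    ai.foldl (fun s issue =>
      if (PySem.Dict.getD (PySem.Dict.mk issue) "section" "") != "" then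
        PySem.Set.add s (PySem.Dict.getD (PySem.Dict.mk issue) "section" "")
      else s) [] =
    PySem.Set.ofList ((ai.filter (fun issue =>
        (PySem.Dict.getD (PySem.Dict.mk issue) "section" "") != "")).map
      (fun issue => PySem.Dict.getD (PySem.Dict.mk issue) "section" "")) := by
  rw [PySem.Set.ofList_eq_foldl, List.foldl_map, PySem.List.foldl_if_eq_foldl_filter]

theorem pv_ofList_nil_iff (xs : List String) : (PySem.Set.ofList xs = []) ↔ xs = [] := by
  constructor
  · intro h
    rw [List.eq_nil_iff_forall_not_mem]
    intro x hx
    have := (PySem.Set.mem_ofList xs x).mpr hx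
    simp [h] at this
  · rintro rfl; rfl

-- ===== VERDICT (by name: the statement is the Claim_ definition above) =====
theorem extract_issue_sections_py_spec : Claim_equal_extract_issue_sections_py := by
  intro gt ai _
  unfold Spec_extract_issue_sections_py extract_issue_sections_py extract_issue_sections_py_alt
  by_cases hai : ai.isEmpty
  · simp [hai]
  · simp only [hai, Bool.false_eq_true, if_false]
    rw [pv_setA_eq]
    have hcomp : (fun issue => PySem.Str.lower (PySem.Dict.getD (PySem.Dict.mk issue) "section" ""))
        = PySem.Str.lower ∘ (fun issue => PySem.Dict.getD (PySem.Dict.mk issue) "section" "") := rfl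
    rw [hcomp, ← List.map_map]
    generalize hL0 : (List.filter (fun issue =>
        (PySem.Dict.getD (PySem.Dict.mk issue) "section" "") != "") ai).map
      (fun issue => PySem.Dict.getD (PySem.Dict.mk issue) "section" "") = L0
    by_cases hnil : L0 = []
    · subst hnil; simp
    · have h1 : (PySem.Set.ofList L0).isEmpty = false := by
        rw [List.isEmpty_eq_false_iff]
        intro h; exact hnil (pv_ofList_nil_iff L0 |>.mp h)
      have h2 : (L0.map PySem.Str.lower).isEmpty = false := by
        simp [hnil]
      simp only [h1, h2, Bool.false_eq_true, if_false]
      rw [pv_foldA_eq_H (L0.map PySem.Str.lower) _ ?hstep ((PySem.Str.split? gt "\n").getD []) [] false ""]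
      case hstep =>
        intro st line
        by_cases h : PySem.Chars.startswith line.toList ['#', '#', ' '] = true
        · simp [pvIsHeader, PySem.Str.startswith, h, PySem.Set.mem_ofList]
          rw [Bool.eq_iff_iff]
          simp [List.any_eq_true, PySem.Set.mem_ofList]
        · simp [pvIsHeader, PySem.Str.startswith, h]
      rw [List.nil_append, pvH_eq_selectB]
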